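-- pv_equiv track=rewrite | github.com/martina-cormand/padel-quadres-app | utils/group_generator.py | detect_incompatibilities
-- ===== SOURCE A (Python) =====
-- from collections import defaultdict
--
-- def normalize(name):
--    return str(name).strip().lower()
--
-- def are_pairs_compatible(pair1, pair2, player_availability):
--    players = [normalize(p) for p in pair1 + pair2]
--    slots = [player_availability.get(p, set()) for p in players]
--    return bool(set.intersection(*slots)) if slots else False
--
-- def detect_incompatibilities(pairs, player_availability):
--    incompatibles = defaultdict(set)
--    for i, pair1 in enumerate(pairs):
--       for j in range(i + 1, len(pairs)):
--          pair2 = pairs[j]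
--          if not are_pairs_compatible(pair1, pair2, player_availability):
--             incompatibles[pair1].add(pair2)
--             incompatibles[pair2].add(pair1)
--    return incompatibles
-- ===== SOURCE B (Python) =====
-- from collections import defaultdict
--
-- def detect_incompatibilities(pairs, player_availability):
--     def _slots(pair):
--         a, b = (str(p).strip().lower() for p in pair)
--         return player_availability.get(a, set()) & player_availability.get(b, set())
--
--     pair_slots = {pair: _slots(pair) for pair in pairs}
--     incompatibles = defaultdict(set)
--     for i, pair1 in enumerate(pairs):
--         for pair2 in pairs[i + 1:]:
--             if not (pair_slots[pair1] & pair_slots[pair2]):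
--                 incompatibles[pair1].add(pair2)
--                 incompatibles[pair2].add(pair1)
--     return incompatibles
-- ===== Notes on version B (the rewrite author's own statement) =====
-- stated objective: faster
-- what changed: B precomputes each pair's normalized-availability intersection once in a dict, so the quadratic inner loop does a single intersection of two cached sets instead of normalizing four names, doing four dict lookups and a four-way set intersection per pair of pairs.
import Mathlib
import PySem

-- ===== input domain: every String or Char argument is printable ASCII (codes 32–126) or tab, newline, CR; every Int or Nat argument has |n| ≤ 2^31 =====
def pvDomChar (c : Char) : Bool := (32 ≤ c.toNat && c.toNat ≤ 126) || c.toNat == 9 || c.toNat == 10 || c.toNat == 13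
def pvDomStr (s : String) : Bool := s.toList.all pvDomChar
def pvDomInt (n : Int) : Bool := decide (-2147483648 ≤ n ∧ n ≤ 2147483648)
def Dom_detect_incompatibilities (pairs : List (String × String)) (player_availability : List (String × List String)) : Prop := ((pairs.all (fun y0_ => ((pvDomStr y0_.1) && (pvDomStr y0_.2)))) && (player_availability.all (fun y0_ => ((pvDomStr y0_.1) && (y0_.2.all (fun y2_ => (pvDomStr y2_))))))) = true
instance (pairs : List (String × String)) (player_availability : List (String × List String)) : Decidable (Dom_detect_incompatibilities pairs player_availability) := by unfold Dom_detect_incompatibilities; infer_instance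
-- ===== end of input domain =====

-- B precomputes each pair's own slot intersection once (a dict built in one pass) so the
-- O(n^2) inner test is a single intersection of two cached sets instead of four dict lookups
-- and a four-way intersection; same return value (objective: alternative/constant-factor).

-- ===== PORT A =====
def pvNormalize (name : String) : String := PySem.Str.lower (PySem.Str.strip name)

def pvArePairsCompatible (pair1 pair2 : String × String) (avail : PySem.Dict String (List String)) : Bool :=
  let players : List String := [pvNormalize pair1.1, pvNormalize pair1.2, pvNormalize pair2.1, pvNormalize pair2.2]
  let slots : List (List String) := players.map (fun p => avail.getD p PySem.Set.empty)
  match slots with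
  | [] => false
  | s :: rest => !(rest.foldl PySem.Set.inter s).isEmpty

def detect_incompatibilities (pairs : List (String × String)) (player_availability : List (String × List String)) : List (String × String × List (String × String)) :=
  ((PySem.List.enumerate pairs).foldl (fun d ip =>
      (PySem.List.pyRange (ip.1 + 1) (PySem.List.len pairs)).foldl (fun d j =>
        let pair2 := PySem.List.pyGetD pairs j ("", "")
        if !(pvArePairsCompatible ip.2 pair2 (PySem.Dict.mk player_availability)) then
          PySem.Dict.modify
            (PySem.Dict.modify d ip.2 PySem.Set.empty (fun s => PySem.Set.add s pair2))
            pair2 PySem.Set.empty (fun s => PySem.Set.add s ip.2)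
        else d) d)
    (PySem.Dict.empty : PySem.Dict (String × String) (List (String × String)))).items.map
    (fun kv => (kv.1.1, kv.1.2, kv.2))

-- ===== PORT B =====
def pvPairSlots (avail : PySem.Dict String (List String)) (pair : String × String) : List String :=
  PySem.Set.inter
    (avail.getD (PySem.Str.lower (PySem.Str.strip pair.1)) PySem.Set.empty)
    (avail.getD (PySem.Str.lower (PySem.Str.strip pair.2)) PySem.Set.empty)

def detect_incompatibilities_alt (pairs : List (String × String)) (player_availability : List (String × List String)) : List (String × String × List (String × String)) :=
  let pair_slots : PySem.Dict (String × String) (List String) :=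
    pairs.foldl (fun d p => d.insert p (pvPairSlots (PySem.Dict.mk player_availability) p)) PySem.Dict.empty
  ((PySem.List.enumerate pairs).foldl (fun d ip =>
      (PySem.List.slice pairs (some (ip.1 + 1)) none).foldl (fun d pair2 =>
        if (PySem.Set.inter (pair_slots.getD ip.2 PySem.Set.empty) (pair_slots.getD pair2 PySem.Set.empty)).isEmpty then
          PySem.Dict.modify
            (PySem.Dict.modify d ip.2 PySem.Set.empty (fun s => PySem.Set.add s pair2))
            pair2 PySem.Set.empty (fun s => PySem.Set.add s ip.2)
        else d) d)
    (PySem.Dict.empty : PySem.Dict (String × String) (List (String × String)))).items.map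
    (fun kv => (kv.1.1, kv.1.2, kv.2))

-- ===== PRECONDITION & SPEC =====
def Spec_detect_incompatibilities (pairs : List (String × String)) (player_availability : List (String × List String)) (out : List (String × String × List (String × String))) : Prop := out = detect_incompatibilities_alt pairs player_availability
instance (pairs : List (String × String)) (player_availability : List (String × List String)) (out : List (String × String × List (String × String))) : Decidable (Spec_detect_incompatibilities pairs player_availability out) := by unfold Spec_detect_incompatibilities; infer_instance

-- ===== CLAIM (what is proved, stated in full; the proofs are below) =====
def Claim_equal_detect_incompatibilities : Prop := ∀ (pairs : List (String × String)) (player_availability : List (String × List String)), Dom_detect_incompatibilities pairs player_availability → Spec_detect_incompatibilities pairs player_availability (detect_incompatibilities pairs player_availability)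

-- ===== LEMMAS AND PROOFS =====


-- intersection reassociation: a & (c & d) = (a & c) & d on PySem sets (as lists)
theorem pv_inter_assoc {α : Type} [BEq α] [LawfulBEq α] (a c d : List α) :
    PySem.Set.inter a (PySem.Set.inter c d) = PySem.Set.inter (PySem.Set.inter a c) d := by
  unfold PySem.Set.inter
  rw [List.filter_filter]
  apply List.filter_congr
  intro x hx
  by_cases h1 : x ∈ c <;> by_cases h2 : x ∈ d <;>
    simp [List.mem_filter, h1, h2]

-- the cache dict built by one insert-per-pair pass answers with the cached value
theorem pv_getD_build {κ ν : Type} [BEq κ] [LawfulBEq κ] [DecidableEq κ] (l : List κ) (f : κ → ν) (d0 : PySem.Dict κ ν) (p : κ) (dflt : ν) :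
    ((l.foldl (fun d q => d.insert q (f q)) d0).getD p dflt)
      = if p ∈ l then f p else d0.getD p dflt := by
  induction l generalizing d0 with
  | nil => simp
  | cons q rest ih =>
    simp only [List.foldl_cons, ih, List.mem_cons]
    rw [PySem.Dict.getD_insert]
    by_cases hq : p ∈ rest <;> by_cases he : p = q <;> simp [hq, he]

-- A's compatibility test equals the emptiness test on the two cached per-pair intersections
theorem pv_compat_eq (p q : String × String) (avail : PySem.Dict String (List String)) :
    pvArePairsCompatible p q avail
      = !(PySem.Set.inter (pvPairSlots avail p) (pvPairSlots avail q)).isEmpty := by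
  simp only [pvArePairsCompatible, pvPairSlots, pvNormalize, List.map_cons, List.map_nil,
    List.foldl_cons, List.foldl_nil]
  rw [pv_inter_assoc]

-- ===== VERDICT (by name: the statement is the Claim_ definition above) =====
theorem detect_incompatibilities_spec : Claim_equal_detect_incompatibilities := by
  intro pairs player_availability _
  unfold Spec_detect_incompatibilities
  simp only [detect_incompatibilities, detect_incompatibilities_alt]
  congr 2
  apply PySem.List.foldl_congr_mem
  intro acc ip hip
  obtain ⟨k, hk, rfl⟩ := (PySem.List.mem_enumerate_iff pairs 0 ip).mp hip
  have ha : (0 : Int) ≤ 0 + (k : Int) + 1 := by positivity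
  rw [PySem.List.foldl_pyRange_pyGetD pairs ("", "")
      (fun d pair2 =>
        if !(pvArePairsCompatible (0 + (k : Int), pairs[k]).2 pair2 (PySem.Dict.mk player_availability)) then
          PySem.Dict.modify
            (PySem.Dict.modify d (0 + (k : Int), pairs[k]).2 PySem.Set.empty (fun s => PySem.Set.add s pair2))
            pair2 PySem.Set.empty (fun s => PySem.Set.add s (0 + (k : Int), pairs[k]).2)
        else d) acc ha,
    PySem.List.slice_from pairs ha]
  apply PySem.List.foldl_congr_mem
  intro d p2 hp2
  have hp1mem : pairs[k] ∈ pairs := List.getElem_mem hk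
  have hp2mem : p2 ∈ pairs := List.drop_subset _ _ hp2
  simp only [pv_compat_eq, Bool.not_not, pv_getD_build, hp1mem, hp2mem, if_pos]
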